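-- pv_equiv track=rewrite | github.com/isabellasocci/focusr-ai | backend/eye_tracking/eye_tracker.py | find_no_strands
-- ===== SOURCE A (Python) =====
-- def find_no_strands(data, min_length=5):
--     no_strands = []
--     current_strand = []
--
--     for engagement, timestamp in data:
--         if engagement.strip().upper() == 'NO.':
--             current_strand.append(timestamp)
--         else:
--             if len(current_strand) >= min_length:
--                 no_strands.append((current_strand[0], current_strand[-1]))
--             current_strand = []
--
--     if len(current_strand) >= min_length:
--         no_strands.append((current_strand[0], current_strand[-1]))
--
--     return no_strands
-- ===== SOURCE B (Python) =====
-- def find_no_strands(data, min_length=5):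
--     ts = [t for _, t in data]
--     seps = [-1] + [i for i, (e, _) in enumerate(data)
--                    if e.strip().upper() != 'NO.'] + [len(data)]
--     return [(ts[a + 1], ts[b - 1])
--             for a, b in zip(seps, seps[1:])
--             if b - a - 1 >= min_length]
-- ===== Notes on version B (the rewrite author's own statement) =====
-- stated objective: alternative
-- what changed: B replaces A's single pass with a run accumulator by staged passes over precomputed data: it builds the list of separator indices (positions of non-'NO.' rows, fenced by -1 and len(data)), pairs adjacent separators with zip, and emits (ts[a+1], ts[b-1]) for every gap of at least min_length, with no run state at all.
-- outside the precondition, e.g. on find_no_strands([('x', 'b')], 0): A raises IndexError, B raises IndexError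
import Mathlib
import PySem

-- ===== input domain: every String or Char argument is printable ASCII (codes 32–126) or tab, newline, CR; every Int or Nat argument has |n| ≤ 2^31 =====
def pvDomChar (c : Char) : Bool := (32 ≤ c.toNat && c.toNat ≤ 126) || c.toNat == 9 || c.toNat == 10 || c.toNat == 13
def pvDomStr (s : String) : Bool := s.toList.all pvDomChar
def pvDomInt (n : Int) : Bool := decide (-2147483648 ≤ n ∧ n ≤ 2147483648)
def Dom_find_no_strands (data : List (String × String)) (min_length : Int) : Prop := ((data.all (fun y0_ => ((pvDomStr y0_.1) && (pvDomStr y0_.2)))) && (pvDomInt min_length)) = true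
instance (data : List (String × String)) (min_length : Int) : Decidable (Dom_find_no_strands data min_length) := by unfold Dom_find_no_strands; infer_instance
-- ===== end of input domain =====

-- B replaces A's run-accumulator pass by staged passes over precomputed data: a separator-index
-- list (positions of non-'NO.' rows fenced by -1 and len(data)), adjacent pairs via zip, and an
-- index-arithmetic emission per large-enough gap; same cost, no run state. Equivalence of the
-- RETURN values is proved for min_length ≥ 1 (Pre_).

-- shared predicate: engagement.strip().upper() == 'NO.'
def pvIsNo (e : String) : Bool := PySem.Str.upper (PySem.Str.strip e) == "NO."

-- ===== PORT A =====
-- A's loop body over the state (no_strands, current_strand)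
def pvStepA (min_length : Int) (acc : List (String × String) × List String)
    (p : String × String) : List (String × String) × List String :=
  if pvIsNo p.1 then (acc.1, acc.2 ++ [p.2])
  else if min_length ≤ (acc.2.length : Int) then
    -- current_strand[0], current_strand[-1]  (pyGetD is total: outside Pre_ nothing is claimed)
    (acc.1 ++ [(PySem.List.pyGetD acc.2 0 "", PySem.List.pyGetD acc.2 (-1) "")], [])
  else (acc.1, [])

-- the post-loop flush (the same code Python repeats after the loop)
def pvFinishA (min_length : Int) (st : List (String × String) × List String) :
    List (String × String) :=
  if min_length ≤ (st.2.length : Int) then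
    st.1 ++ [(PySem.List.pyGetD st.2 0 "", PySem.List.pyGetD st.2 (-1) "")]
  else st.1

def find_no_strands (data : List (String × String)) (min_length : Int) :
    List (String × String) :=
  pvFinishA min_length (data.foldl (pvStepA min_length) ([], []))

-- ===== PORT B =====
-- ts = [t for _, t in data]; seps = [-1] + [i for i,(e,_) in enumerate(data) if not NO] + [len];
-- [(ts[a+1], ts[b-1]) for a, b in zip(seps, seps[1:]) if b - a - 1 >= min_length]
def find_no_strands_alt (data : List (String × String)) (min_length : Int) :
    List (String × String) :=
  let ts := data.map (fun p => p.2)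
  let seps : List Int :=
    [-1] ++ ((PySem.List.enumerate data).filter (fun p => !(pvIsNo p.2.1))).map (fun p => p.1)
      ++ [(data.length : Int)]
  ((seps.zip seps.tail).filter (fun ab => min_length ≤ ab.2 - ab.1 - 1)).map
    (fun ab => (PySem.List.pyGetD ts (ab.1 + 1) "", PySem.List.pyGetD ts (ab.2 - 1) ""))

-- ===== PRECONDITION & SPEC =====
-- Pre_ excludes min_length ≤ 0: there A indexes an empty current_strand whenever a flush point
-- meets an empty run (empty data, a leading, doubled or trailing non-'NO.' entry) and raises
-- IndexError; on the remaining min_length ≤ 0 inputs A returns and B agrees with it.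
def Pre_find_no_strands (data : List (String × String)) (min_length : Int) : Prop :=
  1 ≤ min_length
instance (data : List (String × String)) (min_length : Int) :
    Decidable (Pre_find_no_strands data min_length) := by
  unfold Pre_find_no_strands; infer_instance

def pvWitness_find_no_strands : (List (String × String)) × Int :=
  ([("NO.", "1"), (" no. ", "2"), ("yes", "3"), ("NO.", "4")], 2)

def Spec_find_no_strands (data : List (String × String)) (min_length : Int)
    (out : List (String × String)) : Prop := out = find_no_strands_alt data min_length
instance (data : List (String × String)) (min_length : Int) (out : List (String × String)) :
    Decidable (Spec_find_no_strands data min_length out) := by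
  unfold Spec_find_no_strands; infer_instance

-- ===== CLAIM (what is proved, stated in full; the proofs are below) =====
def Claim_equal_find_no_strands : Prop :=
  ∀ (data : List (String × String)) (min_length : Int),
    Dom_find_no_strands data min_length → Pre_find_no_strands data min_length →
      Spec_find_no_strands data min_length (find_no_strands data min_length)

-- ===== LEMMAS AND PROOFS =====

-- proof-only middle form: groupby-style recursion both sides are reduced to
def pvGoB (min_length : Int) : List (String × String) → List (String × String)
  | [] => []
  | (e, t) :: rest =>
    if pvIsNo e then
      let run := t :: (rest.takeWhile (fun p => pvIsNo p.1)).map Prod.snd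
      (if min_length ≤ (run.length : Int) then
        [(PySem.List.pyGetD run 0 "", PySem.List.pyGetD run (-1) "")]
      else []) ++ pvGoB min_length (rest.dropWhile (fun p => pvIsNo p.1))
    else
      pvGoB min_length (rest.dropWhile (fun p => !pvIsNo p.1))
termination_by l => l.length
decreasing_by
  · exact Nat.lt_succ_of_le (List.length_dropWhile_le _ rest)
  · exact Nat.lt_succ_of_le (List.length_dropWhile_le _ rest)

theorem pvGoB_nil (m : Int) : pvGoB m [] = [] := by rw [pvGoB]

theorem pvGoB_cons_no (m : Int) (e t : String) (rest : List (String × String))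
    (h : pvIsNo e = true) :
    pvGoB m ((e, t) :: rest)
      = (if m ≤ (((t :: (rest.takeWhile (fun p => pvIsNo p.1)).map Prod.snd)).length : Int) then
          [(PySem.List.pyGetD (t :: (rest.takeWhile (fun p => pvIsNo p.1)).map Prod.snd) 0 "",
            PySem.List.pyGetD (t :: (rest.takeWhile (fun p => pvIsNo p.1)).map Prod.snd) (-1) "")]
        else []) ++ pvGoB m (rest.dropWhile (fun p => pvIsNo p.1)) := by
  rw [pvGoB]; simp [h]

theorem pvGoB_cons_not (m : Int) (e t : String) (rest : List (String × String))
    (h : pvIsNo e = false) :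
    pvGoB m ((e, t) :: rest) = pvGoB m (rest.dropWhile (fun p => !pvIsNo p.1)) := by
  rw [pvGoB]; simp [h]

theorem pvStepA_no (m : Int) (ns : List (String × String)) (cur : List String)
    (p : String × String) (h : pvIsNo p.1 = true) :
    pvStepA m (ns, cur) p = (ns, cur ++ [p.2]) := by
  simp [pvStepA, h]

theorem pvStepA_not_empty (m : Int) (hm : 1 ≤ m) (ns : List (String × String))
    (p : String × String) (h : pvIsNo p.1 = false) :
    pvStepA m (ns, []) p = (ns, []) := by
  simp [pvStepA, h]; omega

theorem pvStepA_not (m : Int) (ns : List (String × String)) (cur : List String)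
    (p : String × String) (h : pvIsNo p.1 = false) :
    pvStepA m (ns, cur) p
      = ((if m ≤ (cur.length : Int) then
            ns ++ [(PySem.List.pyGetD cur 0 "", PySem.List.pyGetD cur (-1) "")]
          else ns), []) := by
  simp only [pvStepA, h, Bool.false_eq_true, if_false]; split_ifs <;> simp

theorem pvFinishA_empty (m : Int) (hm : 1 ≤ m) (ns : List (String × String)) :
    pvFinishA m (ns, []) = ns := by
  simp [pvFinishA]; omega

-- the step only appends to the first component
theorem pvStepA_fst (m : Int) (ns : List (String × String)) (cur : List String)
    (p : String × String) :
    pvStepA m (ns, cur) p = (ns ++ (pvStepA m ([], cur) p).1, (pvStepA m ([], cur) p).2) := by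
  simp only [pvStepA]; split_ifs <;> simp

theorem pvFoldA_fst (m : Int) (l : List (String × String)) :
    ∀ (ns : List (String × String)) (cur : List String),
      List.foldl (pvStepA m) (ns, cur) l
        = (ns ++ (List.foldl (pvStepA m) ([], cur) l).1,
           (List.foldl (pvStepA m) ([], cur) l).2) := by
  induction l with
  | nil => intro ns cur; simp
  | cons p l ih =>
    intro ns cur
    rw [List.foldl_cons, List.foldl_cons, pvStepA_fst]
    rcases h : pvStepA m ([], cur) p with ⟨a1, a2⟩
    rw [ih a1 a2, ih (ns ++ a1) a2, List.append_assoc]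

-- the flush commutes with a prefix of the first component
theorem pvFinishA_fst (m : Int) (ns : List (String × String))
    (st : List (String × String) × List String) :
    pvFinishA m (ns ++ st.1, st.2) = ns ++ pvFinishA m st := by
  simp only [pvFinishA]; split_ifs <;> simp

-- a block of 'NO.' rows only extends the current strand
theorem pvFoldA_all_no (m : Int) (tw : List (String × String))
    (h : ∀ p ∈ tw, pvIsNo p.1 = true) :
    ∀ (ns : List (String × String)) (cur : List String),
      List.foldl (pvStepA m) (ns, cur) tw = (ns, cur ++ tw.map Prod.snd) := by
  induction tw with
  | nil => intro ns cur; simp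
  | cons p l ih =>
    intro ns cur
    rw [List.foldl_cons, pvStepA_no m ns cur p (h p (by simp)),
      ih (fun q hq => h q (by simp [hq])) ns (cur ++ [p.2])]
    simp

-- a block of non-'NO.' rows with an empty strand does nothing (needs 1 ≤ m)
theorem pvFoldA_all_not_no (m : Int) (hm : 1 ≤ m) (tw : List (String × String))
    (h : ∀ p ∈ tw, pvIsNo p.1 = false) :
    ∀ (ns : List (String × String)),
      List.foldl (pvStepA m) (ns, []) tw = (ns, []) := by
  induction tw with
  | nil => intro ns; simp
  | cons p l ih =>
    intro ns
    rw [List.foldl_cons, pvStepA_not_empty m hm ns p (h p (by simp)),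
      ih (fun q hq => h q (by simp [hq])) ns]

-- head of a non-empty dropWhile fails the predicate
theorem pvDropWhile_no_head (rest : List (String × String)) (q : String × String)
    (dw2 : List (String × String)) (h : rest.dropWhile (fun p => pvIsNo p.1) = q :: dw2) :
    pvIsNo q.1 = false := by
  induction rest with
  | nil => simp at h
  | cons a l ih =>
    rw [List.dropWhile_cons] at h
    by_cases ha : pvIsNo a.1 = true
    · exact ih (by simpa [ha] using h)
    · have : a = q := by simpa [ha] using congrArg (List.head? ·) h
      subst this; simpa using ha

-- B skips a non-'NO.' prefix before recursing, which is what pvGoB itself does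
theorem pvGoB_dropWhile (m : Int) : ∀ (l : List (String × String)),
    pvGoB m (l.dropWhile (fun p => !pvIsNo p.1)) = pvGoB m l := by
  intro l
  induction l with
  | nil => simp
  | cons p l ih =>
    rcases p with ⟨e, t⟩
    rw [List.dropWhile_cons]
    by_cases h : pvIsNo e = true
    · simp [h]
    · have h' : pvIsNo e = false := by simpa using h
      simp only [h', Bool.not_false, if_true]
      rw [ih, pvGoB_cons_not m e t l h']
      exact ih.symm ▸ ih

-- A-side main equivalence: A's fold+flush = pvGoB (strong induction on the length)
theorem pvMainA (m : Int) (hm : 1 ≤ m) :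
    ∀ (n : Nat) (data : List (String × String)), data.length ≤ n →
      pvFinishA m (List.foldl (pvStepA m) ([], []) data) = pvGoB m data := by
  intro n
  induction n with
  | zero =>
    intro data hlen
    have : data = [] := List.eq_nil_of_length_eq_zero (Nat.le_zero.mp hlen)
    subst this
    rw [List.foldl_nil, pvFinishA_empty m hm, pvGoB_nil]
  | succ n ih =>
    intro data hlen
    rcases data with _ | ⟨⟨e, t⟩, rest⟩
    · rw [List.foldl_nil, pvFinishA_empty m hm, pvGoB_nil]
    · have hrest : rest.length ≤ n := by simpa using hlen
      by_cases h : pvIsNo e = true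
      · -- a 'NO.' run starts
        rw [List.foldl_cons, pvStepA_no m [] [] (e, t) h]
        show pvFinishA m (List.foldl (pvStepA m) ([], [t]) rest) = pvGoB m ((e, t) :: rest)
        have hsplit := List.takeWhile_append_dropWhile
          (p := fun p => pvIsNo p.1) (l := rest)
        have hfold : List.foldl (pvStepA m) ([], [t]) rest
            = List.foldl (pvStepA m)
                ([], t :: (rest.takeWhile (fun p => pvIsNo p.1)).map Prod.snd)
                (rest.dropWhile (fun p => pvIsNo p.1)) := by
          conv_lhs => rw [← hsplit]
          rw [List.foldl_append,
            pvFoldA_all_no m _ (fun q hq => by simpa using List.mem_takeWhile_imp hq) [] [t]]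
          rfl
        rw [hfold, pvGoB_cons_no m e t rest h]
        cases hdwe : rest.dropWhile (fun p => pvIsNo p.1) with
        | nil =>
          rw [List.foldl_nil, pvGoB_nil, List.append_nil]
          simp only [pvFinishA]
          split_ifs <;> simp
        | cons q dw2 =>
          have hq : pvIsNo q.1 = false := pvDropWhile_no_head rest q dw2 hdwe
          rw [List.foldl_cons, pvStepA_not m _ _ q hq]
          have hflip : (if m ≤ ((t :: (rest.takeWhile (fun p => pvIsNo p.1)).map Prod.snd).length : Int) then
              ([] : List (String × String)) ++ [(PySem.List.pyGetD (t :: (rest.takeWhile (fun p => pvIsNo p.1)).map Prod.snd) 0 "",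
                PySem.List.pyGetD (t :: (rest.takeWhile (fun p => pvIsNo p.1)).map Prod.snd) (-1) "")]
            else ([] : List (String × String)))
            = (if m ≤ ((t :: (rest.takeWhile (fun p => pvIsNo p.1)).map Prod.snd).length : Int) then
              [(PySem.List.pyGetD (t :: (rest.takeWhile (fun p => pvIsNo p.1)).map Prod.snd) 0 "",
                PySem.List.pyGetD (t :: (rest.takeWhile (fun p => pvIsNo p.1)).map Prod.snd) (-1) "")]
            else []) := by split_ifs <;> simp
          rw [hflip, pvFoldA_fst, pvFinishA_fst]
          have hdw2 : dw2.length ≤ n := by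
            have hle : (rest.dropWhile (fun p => pvIsNo p.1)).length ≤ rest.length :=
              List.length_dropWhile_le _ _
            rw [hdwe] at hle
            simp at hle
            omega
          rw [ih dw2 hdw2]
          rcases q with ⟨qe, qt⟩
          rw [pvGoB_cons_not m qe qt dw2 hq, pvGoB_dropWhile m dw2]
      · -- a non-'NO.' block starts
        have h' : pvIsNo e = false := by simpa using h
        rw [List.foldl_cons, pvStepA_not_empty m hm [] (e, t) h']
        have hsplit := List.takeWhile_append_dropWhile
          (p := fun p => !pvIsNo p.1) (l := rest)
        have hfold : List.foldl (pvStepA m) (([] : List (String × String)), ([] : List String)) rest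
            = List.foldl (pvStepA m) ([], []) (rest.dropWhile (fun p => !pvIsNo p.1)) := by
          conv_lhs => rw [← hsplit]
          rw [List.foldl_append,
            pvFoldA_all_not_no m hm _
              (fun q hq => by simpa using List.mem_takeWhile_imp hq) []]
        have hdwlen : (rest.dropWhile (fun p => !pvIsNo p.1)).length ≤ n := by
          have := List.length_dropWhile_le (fun p => !pvIsNo p.1) rest
          omega
        rw [hfold, ih _ hdwlen, pvGoB_cons_not m e t rest h']

-- ===== B-side lemmas: the separator/zip form = pvGoB =====

-- positions (with start offset s) of rows whose engagement is not 'NO.'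
def pvSepsFrom (s : Int) (data : List (String × String)) : List Int :=
  ((PySem.List.enumerate data s).filter (fun p => !(pvIsNo p.2.1))).map (fun p => p.1)

-- the zip/filter/map comprehension as a fold over successive separator pairs
def pvB (m : Int) (ts : List String) : Int → List Int → List (String × String)
  | _, [] => []
  | a, b :: r =>
    (if m ≤ b - a - 1 then
      [(PySem.List.pyGetD ts (a + 1) "", PySem.List.pyGetD ts (b - 1) "")]
    else []) ++ pvB m ts b r

theorem pvSepsFrom_nil (s : Int) : pvSepsFrom s [] = [] := by
  simp [pvSepsFrom, PySem.List.enumerate_nil]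

theorem pvSepsFrom_cons (s : Int) (e t : String) (rest : List (String × String)) :
    pvSepsFrom s ((e, t) :: rest)
      = (if pvIsNo e then ([] : List Int) else [s]) ++ pvSepsFrom (s + 1) rest := by
  simp only [pvSepsFrom, PySem.List.enumerate_cons, List.filter_cons]
  by_cases h : pvIsNo e = true <;> simp [h]

theorem pvSepsFrom_all_no (s : Int) (tw : List (String × String))
    (h : ∀ p ∈ tw, pvIsNo p.1 = true) (dw : List (String × String)) :
    pvSepsFrom s (tw ++ dw) = pvSepsFrom (s + tw.length) dw := by
  induction tw generalizing s with
  | nil => simp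
  | cons p l ih =>
    rcases p with ⟨e, t⟩
    rw [List.cons_append, pvSepsFrom_cons, if_pos (h (e, t) (by simp)),
      List.nil_append, ih (s + 1) (fun q hq => h q (by simp [hq]))]
    congr 1
    push_cast [List.length_cons]
    ring

-- zip(seps, seps[1:]) + filter + map unfolds to pvB
theorem pvZip_eq_pvB (m : Int) (ts : List String) :
    ∀ (l : List Int) (a : Int),
      ((((a :: l).zip l).filter (fun ab => m ≤ ab.2 - ab.1 - 1)).map
        (fun ab => (PySem.List.pyGetD ts (ab.1 + 1) "", PySem.List.pyGetD ts (ab.2 - 1) "")))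
      = pvB m ts a l := by
  intro l
  induction l with
  | nil => intro a; simp [pvB]
  | cons b r ih =>
    intro a
    rw [List.zip_cons_cons, List.filter_cons]
    by_cases h : m ≤ b - a - 1
    · rw [if_pos (by simpa using h), List.map_cons, ih b]
      show _ = pvB m ts a (b :: r)
      rw [pvB, if_pos h]
      rfl
    · rw [if_neg (by simpa using h), ih b]
      show _ = pvB m ts a (b :: r)
      rw [pvB, if_neg h, List.nil_append]

-- indexing past a known prefix
theorem pvGetD_append (pre suf : List String) (i : Nat) (h : i < suf.length) (d : String) :
    PySem.List.pyGetD (pre ++ suf) ((pre.length : Int) + (i : Int)) d = suf[i] := by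
  rw [PySem.List.pyGetD_eq_getElem _ _ (by omega)
    (by rw [List.length_append]; push_cast; omega)]
  have htn : ((pre.length : Int) + (i : Int)).toNat = pre.length + i := by omega
  simp only [htn]
  rw [List.getElem_append_right (by omega)]
  congr 1
  omega

-- B-side main: pvB over the separators of data (after a consumed prefix pre) = pvGoB data
set_option maxHeartbeats 1600000 in
theorem pvMainB (m : Int) (hm : 1 ≤ m) :
    ∀ (n : Nat) (data : List (String × String)), data.length ≤ n →
      ∀ (pre : List String),
        pvB m (pre ++ data.map Prod.snd) ((pre.length : Int) - 1)
          (pvSepsFrom (pre.length : Int) data ++ [(pre.length : Int) + data.length])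
        = pvGoB m data := by
  intro n
  induction n with
  | zero =>
    intro data hlen pre
    have : data = [] := List.eq_nil_of_length_eq_zero (Nat.le_zero.mp hlen)
    subst this
    rw [pvSepsFrom_nil, pvGoB_nil]
    simp only [List.nil_append, pvB]
    rw [if_neg (by simp only [List.length_nil, Nat.cast_zero]; omega)]
    simp
  | succ n ih =>
    intro data hlen pre
    rcases data with _ | ⟨⟨e, t⟩, rest⟩
    · rw [pvSepsFrom_nil, pvGoB_nil]
      simp only [List.nil_append, pvB]
      rw [if_neg (by simp only [List.length_nil, Nat.cast_zero]; omega)]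
      simp
    · have hrest : rest.length ≤ n := by simpa using hlen
      rw [pvSepsFrom_cons]
      by_cases h : pvIsNo e = true
      · -- a 'NO.' run: split rest at the end of the run
        rw [if_pos h, List.nil_append]
        have hsplit := List.takeWhile_append_dropWhile
          (p := fun p => pvIsNo p.1) (l := rest)
        set tw := rest.takeWhile (fun p => pvIsNo p.1) with htw
        set dw := rest.dropWhile (fun p => pvIsNo p.1) with hdw
        have hseps : pvSepsFrom ((pre.length : Int) + 1) rest
            = pvSepsFrom ((pre.length : Int) + 1 + tw.length) dw := by
          conv_lhs => rw [← hsplit]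
          exact pvSepsFrom_all_no _ tw
            (fun q hq => by simpa using List.mem_takeWhile_imp hq) dw
        have hlen2 : rest.length = tw.length + dw.length := by
          conv_lhs => rw [← hsplit]
          simp
        -- the run and its surrounding list
        set run := t :: tw.map Prod.snd with hrun
        have hts : pre ++ ((e, t) :: rest).map Prod.snd
            = (pre ++ run) ++ dw.map Prod.snd := by
          simp only [hrun, List.map_cons]
          conv_lhs => rw [← hsplit]
          simp
        have hrunlen : (run.length : Int) = 1 + tw.length := by simp [hrun]; omega
        rw [pvGoB_cons_no m e t rest h, ← htw, ← hdw, ← hrun]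
        rcases hdwe : dw with _ | ⟨⟨qe, qt⟩, dw2⟩
        · -- no separator before the end: seps = [len]
          rw [hdwe] at hseps hlen2 hts
          rw [hseps, pvSepsFrom_nil, List.nil_append]
          have hlen3 : ((pre.length : Int) + (((e, t) :: rest).length : Int))
              = (pre.length : Int) + 1 + tw.length := by
            simp [hlen2]; push_cast; ring
          rw [hlen3]
          simp only [pvB, List.append_nil]
          simp only [pvGoB_nil, List.append_nil]
          have hcond : ((pre.length : Int) + 1 + tw.length - ((pre.length : Int) - 1) - 1)
              = (run.length : Int) := by rw [hrunlen]; ring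
          rw [hcond]
          split_ifs with hc
          · -- emitted pair: indices pre.length and pre.length + tw.length into pre ++ run
            have h0 : PySem.List.pyGetD (pre ++ run) ((pre.length : Int) - 1 + 1) ""
                = PySem.List.pyGetD run 0 "" := by
              have : (pre.length : Int) - 1 + 1 = (pre.length : Int) + ((0 : Nat) : Int) := by
                push_cast; ring
              rw [this, pvGetD_append pre run 0 (by simp [hrun]) ""]
              simp [hrun, PySem.List.pyGetD_zero_cons]
            have h1 : PySem.List.pyGetD (pre ++ run) ((pre.length : Int) + 1 + tw.length - 1) ""
                = PySem.List.pyGetD run (-1) "" := by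
              have hgl : run ≠ [] := by simp [hrun]
              have : (pre.length : Int) + 1 + tw.length - 1
                  = (pre.length : Int) + ((tw.length : Nat) : Int) := by push_cast; ring
              rw [this, pvGetD_append pre run tw.length (by simp [hrun]) "",
                PySem.List.pyGetD_neg_one run "" hgl]
              rw [List.getLast_eq_getElem]
              simp [hrun]
            rw [hts]
            simp only [List.map_nil, List.append_nil]
            rw [h0, h1]
          · rfl
        · -- a separator follows the run
          have hq : pvIsNo qe = false := by
            have := pvDropWhile_no_head rest (qe, qt) dw2 (by rw [← hdwe, hdw])
            simpa using this
          rw [hdwe] at hseps hlen2 hts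
          rw [hseps, pvSepsFrom_cons, if_neg (by simp [hq]), List.cons_append, List.cons_append]
          simp only [pvB]
          have hcond : ((pre.length : Int) + 1 + tw.length - ((pre.length : Int) - 1) - 1)
              = (run.length : Int) := by rw [hrunlen]; ring
          rw [hcond]
          -- the tail: apply the IH with prefix pre ++ run ++ [qt]
          have hts2 : pre ++ ((e, t) :: rest).map Prod.snd
              = ((pre ++ run) ++ [qt]) ++ dw2.map Prod.snd := by
            rw [hts]; simp
          have hlen4 : (((pre ++ run) ++ [qt]).length : Int)
              = (pre.length : Int) + 1 + tw.length + 1 := by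
            simp [hrun]; push_cast; ring
          have hdw2n : dw2.length ≤ n := by
            rw [hlen2] at hrest; simp at hrest; omega
          have htail : pvB m (pre ++ ((e, t) :: rest).map Prod.snd)
                ((pre.length : Int) + 1 + tw.length)
                (pvSepsFrom ((pre.length : Int) + 1 + tw.length + 1) dw2
                  ++ [(pre.length : Int) + (((e, t) :: rest).length : Int)])
              = pvGoB m dw2 := by
            have hlast : (pre.length : Int) + (((e, t) :: rest).length : Int)
                = (((pre ++ run) ++ [qt]).length : Int) + dw2.length := by
              rw [hlen4]; simp only [List.length_cons, hlen2]; push_cast; omega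
            have hmid : (pre.length : Int) + 1 + tw.length
                = (((pre ++ run) ++ [qt]).length : Int) - 1 := by rw [hlen4]; ring
            rw [hts2, hlast, hmid]
            simp only [sub_add_cancel]
            exact ih dw2 hdw2n ((pre ++ run) ++ [qt])
          rw [List.nil_append]
          rw [htail]
          have hgo2 : pvGoB m ((qe, qt) :: dw2) = pvGoB m dw2 := by
            rw [pvGoB_cons_not m qe qt dw2 hq, pvGoB_dropWhile m dw2]
          rw [hgo2]
          have h0 : PySem.List.pyGetD (pre ++ ((e, t) :: rest).map Prod.snd)
                ((pre.length : Int) - 1 + 1) "" = PySem.List.pyGetD run 0 "" := by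
            have heq : (pre.length : Int) - 1 + 1 = (pre.length : Int) + ((0 : Nat) : Int) := by
              push_cast; ring
            rw [hts, List.append_assoc, heq]
            simp only [List.map_cons]
            rw [pvGetD_append pre (run ++ (qt :: dw2.map Prod.snd)) 0 (by simp [hrun]) ""]
            rw [List.getElem_append_left (by simp [hrun])]
            simp [hrun, PySem.List.pyGetD_zero_cons]
          have h1 : PySem.List.pyGetD (pre ++ ((e, t) :: rest).map Prod.snd)
                ((pre.length : Int) + 1 + tw.length - 1) "" = PySem.List.pyGetD run (-1) "" := by
            have hgl : run ≠ [] := by simp [hrun]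
            have heq : (pre.length : Int) + 1 + tw.length - 1
                = (pre.length : Int) + ((tw.length : Nat) : Int) := by push_cast; ring
            rw [hts, List.append_assoc, heq]
            simp only [List.map_cons]
            rw [pvGetD_append pre (run ++ (qt :: dw2.map Prod.snd)) tw.length
                (by simp [hrun]) ""]
            rw [List.getElem_append_left (by simp [hrun]),
              PySem.List.pyGetD_neg_one run "" hgl, List.getLast_eq_getElem]
            simp [hrun]
          rw [h0, h1]
      · -- a non-'NO.' row: its index is the first separator, the gap before it is empty
        have h' : pvIsNo e = false := by simpa using h
        rw [if_neg (by simp [h']), List.cons_append, List.cons_append]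
        simp only [pvB]
        rw [if_neg (by omega), List.nil_append]
        have hts : pre ++ ((e, t) :: rest).map Prod.snd = (pre ++ [t]) ++ rest.map Prod.snd := by
          simp
        have hlen4 : ((pre ++ [t]).length : Int) = (pre.length : Int) + 1 := by
          simp
        have htail : pvB m (pre ++ ((e, t) :: rest).map Prod.snd) ((pre.length : Int))
              (pvSepsFrom ((pre.length : Int) + 1) rest
                ++ [(pre.length : Int) + (((e, t) :: rest).length : Int)])
            = pvGoB m rest := by
          have hlast : (pre.length : Int) + (((e, t) :: rest).length : Int)
              = ((pre ++ [t]).length : Int) + rest.length := by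
            rw [hlen4]; push_cast; simp; ring
          have hmid : (pre.length : Int) = ((pre ++ [t]).length : Int) - 1 := by
            rw [hlen4]; ring
          rw [hts, hlast, hmid]
          simp only [sub_add_cancel]
          exact ih rest hrest (pre ++ [t])
        rw [List.nil_append]
        rw [htail, pvGoB_cons_not m e t rest h', pvGoB_dropWhile m rest]

-- ===== VERDICT (by name: the statement is the Claim_ definition above) =====
theorem find_no_strands_spec : Claim_equal_find_no_strands := by
  intro data min_length _hdom hpre
  unfold Spec_find_no_strands find_no_strands find_no_strands_alt
  rw [pvMainA min_length hpre data.length data (le_refl _)]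
  have hzip := pvZip_eq_pvB min_length (data.map (fun p => p.2))
    (pvSepsFrom 0 data ++ [(data.length : Int)]) (-1)
  have hmap : data.map (fun p => p.2) = data.map Prod.snd := rfl
  have hmain := pvMainB min_length hpre data.length data (le_refl _) []
  simp only [List.nil_append, List.length_nil, Nat.cast_zero, zero_sub, zero_add] at hmain
  show pvGoB min_length data
    = (((((-1) :: (pvSepsFrom 0 data ++ [(data.length : Int)])).zip
          (((-1) :: (pvSepsFrom 0 data ++ [(data.length : Int)])).tail)).filter
        (fun ab => min_length ≤ ab.2 - ab.1 - 1)).map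
      (fun ab => (PySem.List.pyGetD (data.map (fun p => p.2)) (ab.1 + 1) "",
                  PySem.List.pyGetD (data.map (fun p => p.2)) (ab.2 - 1) "")))
  rw [List.tail_cons, hzip, hmap, hmain]
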